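-- pv_equiv track=rewrite | github.com/Netronome/agilio-ovs-openstack-plugin | ansible/roles/probe-tuning-profile/scripts/gen_tuning_profile.py | _convert_cpulist_to_siblings
-- ===== SOURCE A (Python) =====
-- def _convert_cpulist_to_siblings(cpulist):
--     """Converts CORE,SOCKET,CPU tuples to a list of CPU siblings"""
--     if len(cpulist) == 0:
--         return []
--     cpulist = sorted(cpulist)
--     all_siblings = []
--     current_siblings = []
--     sibling_core_socket = cpulist[0][0], cpulist[0][1]
--     for cpu in cpulist:
--         cpu_core_socket = cpu[0], cpu[1]
--         if sibling_core_socket == cpu_core_socket: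
--             current_siblings.append(cpu[2])
--         else:
--             all_siblings.append(current_siblings)
--             current_siblings = [cpu[2]]
--             sibling_core_socket = cpu_core_socket
--     all_siblings.append(current_siblings)
--     return all_siblings
-- ===== SOURCE B (Python) =====
-- def _convert_cpulist_to_siblings(cpulist):
--     """Converts CORE,SOCKET,CPU tuples to a list of CPU siblings"""
--     groups = {}
--     for cpu in sorted(cpulist):
--         groups.setdefault((cpu[0], cpu[1]), []).append(cpu[2])
--     return list(groups.values())
-- ===== Notes on version B (the rewrite author's own statement) =====
-- stated objective: idiomatic
-- what changed: Replaces the running-sentinel/current-group state machine (with its explicit empty-list guard and post-loop flush) by a single pass that groups CPU ids into a dict keyed by (core, socket) via setdefault and returns its values; insertion order over the sorted list reproduces A's group and within-group order.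
import Mathlib
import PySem

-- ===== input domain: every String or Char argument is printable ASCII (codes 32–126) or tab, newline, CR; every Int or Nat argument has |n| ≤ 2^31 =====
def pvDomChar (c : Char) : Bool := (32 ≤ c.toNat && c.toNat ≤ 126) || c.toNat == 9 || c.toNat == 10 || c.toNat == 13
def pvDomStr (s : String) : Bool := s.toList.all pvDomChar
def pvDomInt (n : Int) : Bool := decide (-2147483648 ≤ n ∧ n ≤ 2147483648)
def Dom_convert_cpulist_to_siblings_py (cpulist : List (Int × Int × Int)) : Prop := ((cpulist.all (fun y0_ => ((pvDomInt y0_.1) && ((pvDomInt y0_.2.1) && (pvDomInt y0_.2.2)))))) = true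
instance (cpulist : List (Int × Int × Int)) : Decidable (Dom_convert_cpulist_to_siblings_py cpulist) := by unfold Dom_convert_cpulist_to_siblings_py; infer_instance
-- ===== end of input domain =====

-- B replaces A's running-sentinel/current-group state machine (empty guard + post-loop flush) by one
-- pass over the same sorted list that groups CPU ids into a dict keyed by (core, socket); idiomatic, same cost.

-- ===== PORT A =====
-- sorted(cpulist): Python compares tuples lexicographically, so the sort key maps into the lexicographic product order
def pvKey3 (x : Int × Int × Int) : Lex (Int × Lex (Int × Int)) := toLex (x.1, toLex (x.2.1, x.2.2))
def pvSort (cpulist : List (Int × Int × Int)) : List (Int × Int × Int) :=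
  PySem.List.sorted cpulist pvKey3 false

def convert_cpulist_to_siblings_py (cpulist : List (Int × Int × Int)) : List (List Int) :=
  if cpulist.length = 0 then []
  else
    let cpulist' := pvSort cpulist
    -- cpulist[0][0], cpulist[0][1]: cpulist' is nonempty here, so headI is exactly element 0
    let st := cpulist'.foldl
      (fun st cpu =>
        let ck : Int × Int := (cpu.1, cpu.2.1)
        if st.2.2 = ck then (st.1, st.2.1 ++ [cpu.2.2], st.2.2)
        else (st.1 ++ [st.2.1], [cpu.2.2], ck))
      (([] : List (List Int)), ([] : List Int), (cpulist'.headI.1, cpulist'.headI.2.1))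
    st.1 ++ [st.2.1]

-- ===== PORT B =====
def convert_cpulist_to_siblings_py_alt (cpulist : List (Int × Int × Int)) : List (List Int) :=
  ((pvSort cpulist).foldl
    (fun (groups : PySem.Dict (Int × Int) (List Int)) cpu =>
      -- groups.setdefault((cpu[0], cpu[1]), []).append(cpu[2])
      groups.modify (cpu.1, cpu.2.1) [] (fun v => v ++ [cpu.2.2]))
    PySem.Dict.empty).values

-- ===== PRECONDITION & SPEC =====
def Spec_convert_cpulist_to_siblings_py (cpulist : List (Int × Int × Int)) (out : List (List Int)) : Prop := out = convert_cpulist_to_siblings_py_alt cpulist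
instance (cpulist : List (Int × Int × Int)) (out : List (List Int)) : Decidable (Spec_convert_cpulist_to_siblings_py cpulist out) := by unfold Spec_convert_cpulist_to_siblings_py; infer_instance

-- ===== CLAIM (what is proved, stated in full; the proofs are below) =====
def Claim_equal_convert_cpulist_to_siblings_py : Prop := ∀ (cpulist : List (Int × Int × Int)), Dom_convert_cpulist_to_siblings_py cpulist → Spec_convert_cpulist_to_siblings_py cpulist (convert_cpulist_to_siblings_py cpulist)

-- ===== LEMMAS AND PROOFS =====

-- A's loop body, as a step function over ((core, socket), cpu) pairs
def pvStep (st : List (List Int) × List Int × (Int × Int)) (q : (Int × Int) × Int) :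
    List (List Int) × List Int × (Int × Int) :=
  if st.2.2 = q.1 then (st.1, st.2.1 ++ [q.2], st.2.2) else (st.1 ++ [st.2.1], [q.2], q.1)

-- the tuples viewed as ((core, socket), cpu) pairs
def pvPairs (L : List (Int × Int × Int)) : List ((Int × Int) × Int) :=
  L.map (fun x => ((x.1, x.2.1), x.2.2))

-- common specification: the list chunked into maximal runs of equal (core, socket) key
def pvChunks : List ((Int × Int) × Int) → List (List Int)
  | [] => []
  | p :: rest =>
    (p.2 :: (rest.takeWhile (fun q => q.1 == p.1)).map (fun q => q.2)) ::
      pvChunks (rest.dropWhile (fun q => q.1 == p.1))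
termination_by M => M.length
decreasing_by
  simp only [List.length_cons]
  exact Nat.lt_succ_of_le (List.length_dropWhile_le _ _)

lemma pv_dropWhile_head {α : Type} (p : α → Bool) :
    ∀ (l : List α) (x : α) (xs : List α), l.dropWhile p = x :: xs → p x = false := by
  intro l
  induction l with
  | nil => intro x xs h; simp [List.dropWhile] at h
  | cons a t ih =>
    intro x xs h
    rw [List.dropWhile_cons] at h
    by_cases hp : p a = true
    · rw [if_pos hp] at h; exact ih x xs h
    · rw [if_neg hp] at h
      injection h with h1 h2
      subst h1
      simpa using hp

lemma pv_mono {x y : Int × Int × Int} (h : pvKey3 x ≤ pvKey3 y) :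
    (toLex (x.1, x.2.1) : Lex (Int × Int)) ≤ toLex (y.1, y.2.1) := by
  unfold pvKey3 at h
  rw [Prod.Lex.le_iff] at h ⊢
  simp only [ofLex_toLex] at h ⊢
  rcases h with h1 | ⟨h1, h2⟩
  · exact Or.inl h1
  · rw [Prod.Lex.le_iff] at h2
    simp only [ofLex_toLex] at h2
    rcases h2 with h2 | ⟨h2, h3⟩
    · exact Or.inr ⟨h1, le_of_lt h2⟩
    · exact Or.inr ⟨h1, le_of_eq h2⟩

-- A's fold, from an arbitrary state, produces the chunks of the remaining list
lemma pv_foldA : ∀ (M : List ((Int × Int) × Int)) (acc : List (List Int)) (cur : List Int) (s : Int × Int),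
    (M.foldl pvStep (acc, cur, s)).1 ++ [(M.foldl pvStep (acc, cur, s)).2.1] =
      acc ++ (cur ++ (M.takeWhile (fun q => q.1 == s)).map (fun q => q.2)) ::
        pvChunks (M.dropWhile (fun q => q.1 == s)) := by
  intro M
  induction M with
  | nil => intro acc cur s; simp [pvChunks]
  | cons q rest ih =>
    intro acc cur s
    by_cases h : s = q.1
    · have hb : (q.1 == s) = true := by simp [h]
      have hstep : pvStep (acc, cur, s) q = (acc, cur ++ [q.2], s) := by
        simp [pvStep, h]
      simp only [List.foldl_cons, List.takeWhile_cons, List.dropWhile_cons, hb, if_true, hstep]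
      rw [ih]
      simp
    · have hb : (q.1 == s) = false := by
        rw [beq_eq_false_iff_ne]
        exact fun he => h he.symm
      have hstep : pvStep (acc, cur, s) q = (acc ++ [cur], [q.2], q.1) := by
        simp [pvStep, h]
      simp only [List.foldl_cons, List.takeWhile_cons, List.dropWhile_cons, hb, hstep,
        Bool.false_eq_true, if_false]
      rw [ih]
      simp only [pvChunks]
      simp

-- translating A's literal loop to the pair-level fold
lemma pv_foldA_pairs : ∀ (L : List (Int × Int × Int)) (st : List (List Int) × List Int × (Int × Int)),
    L.foldl
      (fun st cpu =>
        if st.2.2 = (cpu.1, cpu.2.1) then (st.1, st.2.1 ++ [cpu.2.2], st.2.2)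
        else (st.1 ++ [st.2.1], [cpu.2.2], (cpu.1, cpu.2.1))) st
      = (pvPairs L).foldl pvStep st := by
  intro L
  induction L with
  | nil => intro st; rfl
  | cons x t ih =>
    intro st
    simp only [pvPairs, List.map_cons, List.foldl_cons]
    simp only [pvPairs] at ih
    rw [ih]
    try rfl
    try simp [pvStep]

-- translating B's literal loop to the pair-level fold
lemma pv_foldl_pairs : ∀ (L : List (Int × Int × Int)) (d0 : PySem.Dict (Int × Int) (List Int)),
    L.foldl (fun groups cpu => groups.modify (cpu.1, cpu.2.1) [] (fun v => v ++ [cpu.2.2])) d0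
      = (pvPairs L).foldl (fun d p => d.modify p.1 [] (fun v => v ++ [p.2])) d0 := by
  intro L
  induction L with
  | nil => intro d0; rfl
  | cons x t ih =>
    intro d0
    simp only [pvPairs, List.map_cons, List.foldl_cons]
    simp only [pvPairs] at ih
    rw [ih]

-- one maximal run of an identical key, folded into the dict: the key is appended, its group collected
lemma pv_block (p : (Int × Int) × Int) (run : List ((Int × Int) × Int))
    (hrun : ∀ q ∈ run, q.1 = p.1)
    (d : PySem.Dict (Int × Int) (List Int)) (hnd : d.keys.Nodup) (hs : p.1 ∉ d.keys) :
    ((p :: run).foldl (fun d q => d.modify q.1 [] (fun v => v ++ [q.2])) d).keys = d.keys ++ [p.1] ∧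
    ((p :: run).foldl (fun d q => d.modify q.1 [] (fun v => v ++ [q.2])) d).values
      = d.values ++ [p.2 :: run.map (fun q => q.2)] := by
  have hkeys :
      ((p :: run).foldl (fun d q => d.modify q.1 [] (fun v => v ++ [q.2])) d).keys
        = d.keys ++ [p.1] := by
    have h0 :
        ((p :: run).foldl (fun d q => d.modify q.1 [] (fun v => v ++ [q.2])) d).keys
          = PySem.Set.update d.keys ((p :: run).map (fun q => q.1)) :=
      PySem.Dict.keys_foldl_modify_key (p :: run) (fun q => q.1) [] (fun _ q v => v ++ [q.2]) d
    rw [h0]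
    rw [List.map_cons, PySem.Set.update_cons, PySem.Set.add_of_not_mem hs,
      PySem.Set.update_eq_append_filter]
    have hfil :
        (PySem.Set.ofList (run.map (fun q => q.1))).filter
          (fun y => !(PySem.Set.contains (d.keys ++ [p.1]) y)) = [] := by
      rw [List.filter_eq_nil_iff]
      intro a ha
      have ha' : a ∈ List.map (fun q => q.1) run := by simpa using ha
      obtain ⟨q, hq, ha2⟩ := List.mem_map.mp ha'
      have haa : a = p.1 := by rw [← ha2]; exact hrun q hq
      rw [haa]
      simp
    rw [hfil, List.append_nil]
  have hgetD : ∀ c,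
      ((p :: run).foldl (fun d q => d.modify q.1 [] (fun v => v ++ [q.2])) d).getD c []
        = d.getD c [] ++ ((p :: run).filter (fun q => q.1 == c)).map (fun q => q.2) :=
    fun c => PySem.Dict.getD_foldl_modify_append (p :: run) d c
  have hdisj : d.keys.Disjoint [p.1] := by
    intro k hk hkk
    rw [List.mem_singleton] at hkk
    exact hs (hkk ▸ hk)
  have hndk : ((p :: run).foldl (fun d q => d.modify q.1 [] (fun v => v ++ [q.2])) d).keys.Nodup := by
    rw [hkeys]
    exact hnd.append (List.nodup_singleton _) hdisj
  refine ⟨hkeys, ?_⟩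
  rw [PySem.Dict.values_eq_map_keys _ hndk ([] : List Int), hkeys, List.map_append]
  congr 1
  · rw [PySem.Dict.values_eq_map_keys d hnd ([] : List Int)]
    apply List.map_congr_left
    intro c hc
    have hcne : c ≠ p.1 := fun he => hs (he ▸ hc)
    rw [hgetD c]
    have hf : (p :: run).filter (fun q => q.1 == c) = [] := by
      rw [List.filter_eq_nil_iff]
      intro q hq
      have hq1 : q.1 = p.1 := by
        rcases List.mem_cons.mp hq with rfl | hmem
        · rfl
        · exact hrun q hmem
      simp only [hq1, beq_iff_eq]
      exact fun he => hcne he.symm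
    rw [hf]
    simp
  · rw [List.map_cons, List.map_nil, hgetD p.1]
    have hdp : d.getD p.1 [] = [] := by
      apply PySem.Dict.getD_of_not_contains
      rw [PySem.Dict.contains_eq_decide_mem_keys]
      simp [hs]
    have hf : (p :: run).filter (fun q => q.1 == p.1) = p :: run := by
      rw [List.filter_eq_self]
      intro q hq
      rcases List.mem_cons.mp hq with rfl | hmem
      · simp
      · simp [hrun q hmem]
    rw [hf, hdp]
    simp

-- B's dict fold over a key-sorted pair list, from any dict with fresh keys, appends the chunks
lemma pvB : ∀ (M : List ((Int × Int) × Int)),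
    (M.map (fun q => q.1)).Pairwise (fun a b => (toLex a : Lex (Int × Int)) ≤ toLex b) →
    ∀ (d : PySem.Dict (Int × Int) (List Int)), d.keys.Nodup → (∀ q ∈ M, q.1 ∉ d.keys) →
    (M.foldl (fun d p => d.modify p.1 [] (fun v => v ++ [p.2])) d).values
      = d.values ++ pvChunks M := by
  intro M
  induction M using pvChunks.induct with
  | case1 => intro _ d _ _; simp [pvChunks]
  | case2 p rest ih =>
    intro hpw d hnd hfresh
    have f1 : ∀ q ∈ rest.takeWhile (fun q => q.1 == p.1), q.1 = p.1 := by
      intro q hq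
      have h' := List.mem_takeWhile_imp hq
      simpa using h'
    have hsplit : p :: rest
        = (p :: rest.takeWhile (fun q => q.1 == p.1)) ++ rest.dropWhile (fun q => q.1 == p.1) := by
      rw [List.cons_append, List.takeWhile_append_dropWhile]
    obtain ⟨hkeys, hvals⟩ :=
      pv_block p (rest.takeWhile (fun q => q.1 == p.1)) f1 d hnd (hfresh p (by simp))
    have hdisj1 : d.keys.Disjoint [p.1] := by
      intro k hk hkk
      rw [List.mem_singleton] at hkk
      exact (hfresh p (by simp)) (hkk ▸ hk)
    have hnd1 :
        ((p :: rest.takeWhile (fun q => q.1 == p.1)).foldl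
          (fun d q => d.modify q.1 [] (fun v => v ++ [q.2])) d).keys.Nodup := by
      rw [hkeys]
      exact hnd.append (List.nodup_singleton _) hdisj1
    have hpc : (List.map (fun q => q.1) (p :: rest)).Pairwise
        (fun a b => (toLex a : Lex (Int × Int)) ≤ toLex b) := hpw
    rw [List.map_cons, List.pairwise_cons] at hpc
    obtain ⟨hhead, htail⟩ := hpc
    have hsub : (rest.dropWhile (fun q => q.1 == p.1)).Sublist rest := List.dropWhile_sublist _
    have hpw2 : ((rest.dropWhile (fun q => q.1 == p.1)).map (fun q => q.1)).Pairwise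
        (fun a b => (toLex a : Lex (Int × Int)) ≤ toLex b) :=
      htail.sublist (hsub.map (fun q => q.1))
    have f3 : ∀ q ∈ rest.dropWhile (fun q => q.1 == p.1), q.1 ≠ p.1 := by
      cases h2 : rest.dropWhile (fun q => q.1 == p.1) with
      | nil => intro q hq; simp at hq
      | cons hh tt =>
        have hhf : (hh.1 == p.1) = false := pv_dropWhile_head _ rest hh tt h2
        have hne : hh.1 ≠ p.1 := by simpa using hhf
        have hmemrest : ∀ q ∈ hh :: tt, q ∈ rest := fun q hq => hsub.subset (h2 ▸ hq)
        have hlt : (toLex p.1 : Lex (Int × Int)) < toLex hh.1 := by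
          refine lt_of_le_of_ne (hhead _ (List.mem_map_of_mem (hmemrest hh (by simp)))) ?_
          intro he
          have hph : p.1 = hh.1 := by simpa using congrArg ofLex he
          exact hne hph.symm
        have hpw2' : (List.map (fun q => q.1) (hh :: tt)).Pairwise
            (fun a b => (toLex a : Lex (Int × Int)) ≤ toLex b) := h2 ▸ hpw2
        rw [List.map_cons, List.pairwise_cons] at hpw2'
        intro q hq
        rcases List.mem_cons.mp hq with rfl | hq'
        · exact hne
        · have hht : (toLex hh.1 : Lex (Int × Int)) ≤ toLex q.1 :=
            hpw2'.1 _ (List.mem_map_of_mem hq')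
          intro he
          have hcon : (toLex p.1 : Lex (Int × Int)) < toLex q.1 := lt_of_lt_of_le hlt hht
          rw [he] at hcon
          exact lt_irrefl _ hcon
    have hfresh2 : ∀ q ∈ rest.dropWhile (fun q => q.1 == p.1),
        q.1 ∉ ((p :: rest.takeWhile (fun q => q.1 == p.1)).foldl
          (fun d q => d.modify q.1 [] (fun v => v ++ [q.2])) d).keys := by
      intro q hq
      rw [hkeys]
      intro hmem
      rcases List.mem_append.mp hmem with hm | hm
      · exact hfresh q (List.mem_cons_of_mem _ (hsub.subset hq)) hm
      · exact f3 q hq (List.mem_singleton.mp hm)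
    conv_lhs => rw [hsplit]
    rw [List.foldl_append]
    rw [ih hpw2 _ hnd1 hfresh2, hvals]
    simp only [pvChunks]
    simp [List.append_assoc]

-- ===== VERDICT (by name: the statement is the Claim_ definition above) =====
theorem convert_cpulist_to_siblings_py_spec : Claim_equal_convert_cpulist_to_siblings_py := by
  intro cpulist _
  unfold Spec_convert_cpulist_to_siblings_py
  have hpw3 : (pvSort cpulist).Pairwise (fun a b => pvKey3 a ≤ pvKey3 b) := by
    simpa [pvSort] using PySem.List.sorted_pairwise cpulist pvKey3
  have hpw : ((pvPairs (pvSort cpulist)).map (fun q => q.1)).Pairwise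
      (fun a b => (toLex a : Lex (Int × Int)) ≤ toLex b) := by
    simp only [pvPairs, List.map_map, List.pairwise_map, Function.comp]
    exact hpw3.imp (fun h => pv_mono h)
  have hB : convert_cpulist_to_siblings_py_alt cpulist
      = pvChunks (pvPairs (pvSort cpulist)) := by
    unfold convert_cpulist_to_siblings_py_alt
    rw [pv_foldl_pairs]
    rw [pvB (pvPairs (pvSort cpulist)) hpw PySem.Dict.empty (by simp [PySem.Dict.keys_empty])
      (by intro q _; simp [PySem.Dict.keys_empty])]
    rfl
  by_cases hc : cpulist = []
  · subst hc; rfl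
  · rw [hB]
    unfold convert_cpulist_to_siblings_py
    have hlen : ¬ (cpulist.length = 0) := by simpa [List.length_eq_zero_iff] using hc
    rw [if_neg hlen]
    dsimp only
    have hL : pvSort cpulist ≠ [] := by
      rw [pvSort, Ne, PySem.List.sorted_eq_nil_iff]
      exact hc
    obtain ⟨x, t, hxt⟩ : ∃ x t, pvSort cpulist = x :: t := by
      cases h : pvSort cpulist with
      | nil => exact absurd h hL
      | cons a b => exact ⟨a, b, rfl⟩
    rw [pv_foldA_pairs, hxt]
    simp only [List.headI_cons]
    rw [pv_foldA]
    simp only [pvPairs, List.map_cons]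
    simp only [pvChunks]
    simp
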